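-- pv_equiv track=rewrite | github.com/Coder-sai2004/leetcode | 4281-score-validator/score-validator.py | scoreValidator
-- ===== SOURCE A (Python) =====
-- def scoreValidator(events: list[str]) -> list[int]:
--     score=0
--     counter=0
--     for i in events:
--         if counter==10:
--             break
--         if i=="WD" or i=="NB":
--             score+=1
--         elif i=="0" or i=="1" or i=="2" or i=="3" or i=="4" or i=="6":
--             score+=int(i)
--         elif i=="W":
--             counter+=1
--     return [score,counter]
-- ===== SOURCE B (Python) =====
-- def scoreValidator(events: list[str]) -> list[int]:
--     # positions of wickets
--     pos = [i for i, e in enumerate(events) if e == "W"]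
--     if len(pos) >= 10:
--         prefix = events[:pos[9] + 1]
--         counter = 10
--     else:
--         prefix = events
--         counter = len(pos)
--     vals = {"WD": 1, "NB": 1, "0": 0, "1": 1, "2": 2, "3": 3, "4": 4, "6": 6}
--     score = sum(vals.get(e, 0) for e in prefix)
--     return [score, counter]
-- ===== Notes on version B (the rewrite author's own statement) =====
-- stated objective: alternative
-- what changed: Instead of A's single loop with two accumulators and a break, B first locates the wicket positions to determine the effective prefix (up to and including the 10th 'W') and the counter, then sums token values over that prefix via a dictionary lookup.
import Mathlib
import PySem

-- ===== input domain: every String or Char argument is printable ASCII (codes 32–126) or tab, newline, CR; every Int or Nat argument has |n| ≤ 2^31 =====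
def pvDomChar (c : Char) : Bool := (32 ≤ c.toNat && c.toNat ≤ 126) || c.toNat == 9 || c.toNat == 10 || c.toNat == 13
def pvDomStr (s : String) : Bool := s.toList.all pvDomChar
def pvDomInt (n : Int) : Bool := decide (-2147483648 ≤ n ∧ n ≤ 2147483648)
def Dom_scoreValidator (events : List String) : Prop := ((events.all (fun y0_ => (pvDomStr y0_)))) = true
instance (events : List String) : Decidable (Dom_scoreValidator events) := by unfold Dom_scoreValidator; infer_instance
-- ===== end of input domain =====

-- B recomputes the same result by locating the 10th wicket first and then summing a token-value
-- dictionary over that prefix (alternative decomposition; same asymptotic cost, not claimed faster).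

-- ===== PORT A =====
-- the for-loop of A with its two accumulators; `break` = the early return when counter == 10
def scoreValidatorLoop : List String → Int → Int → Int × Int
  | [], score, counter => (score, counter)
  | i :: rest, score, counter =>
    if counter == 10 then (score, counter)
    else if i == "WD" || i == "NB" then scoreValidatorLoop rest (score + 1) counter
    else if i == "0" || i == "1" || i == "2" || i == "3" || i == "4" || i == "6" then
      scoreValidatorLoop rest (score + (PySem.Int.ofStr? i).getD 0) counter
    else if i == "W" then scoreValidatorLoop rest score (counter + 1)
    else scoreValidatorLoop rest score counter

def scoreValidator (events : List String) : List Int :=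
  let r := scoreValidatorLoop events 0 0
  [r.1, r.2]

-- ===== PORT B =====
-- the dict literal `vals` of Source B
def svVals : PySem.Dict String Int :=
  PySem.Dict.ofList [("WD",1),("NB",1),("0",0),("1",1),("2",2),("3",3),("4",4),("6",6)]

def scoreValidator_alt (events : List String) : List Int :=
  -- pos = [i for i, e in enumerate(events) if e == "W"]
  let pos := ((PySem.List.enumerate events).filter (fun p => p.2 == "W")).map (fun p => p.1)
  -- prefix/counter; events[:pos[9]+1] is the prefix take (pos[9] is guarded in range)
  let pc : List String × Int :=
    if pos.length ≥ 10 then (events.take ((pos.getD 9 0).toNat + 1), 10)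
    else (events, (pos.length : Int))
  -- score = sum(vals.get(e, 0) for e in prefix)
  let score := pc.1.foldl (fun s e => s + svVals.getD e 0) 0
  [score, pc.2]

-- ===== PRECONDITION & SPEC =====
def Spec_scoreValidator (events : List String) (out : List Int) : Prop := out = scoreValidator_alt events
instance (events : List String) (out : List Int) : Decidable (Spec_scoreValidator events out) := by unfold Spec_scoreValidator; infer_instance

-- ===== CLAIM (what is proved, stated in full; the proofs are below) =====
def Claim_equal_scoreValidator : Prop := ∀ (events : List String), Dom_scoreValidator events → Spec_scoreValidator events (scoreValidator events)

-- ===== LEMMAS AND PROOFS =====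

-- value contributed by one token (0 for "W" and for invalid tokens)
def svTok (e : String) : Int :=
  if e == "WD" || e == "NB" then 1
  else if e == "0" then 0 else if e == "1" then 1 else if e == "2" then 2
  else if e == "3" then 3 else if e == "4" then 4 else if e == "6" then 6 else 0

theorem svVals_getD (e : String) : svVals.getD e 0 = svTok e := by
  by_cases hWD : e = "WD"; · subst hWD; decide
  by_cases hNB : e = "NB"; · subst hNB; decide
  by_cases h0 : e = "0"; · subst h0; decide
  by_cases h1 : e = "1"; · subst h1; decide
  by_cases h2 : e = "2"; · subst h2; decide
  by_cases h3 : e = "3"; · subst h3; decide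
  by_cases h4 : e = "4"; · subst h4; decide
  by_cases h6 : e = "6"; · subst h6; decide
  have b1 : ("WD" == e) = false := by simp [Ne.symm hWD]
  have b2 : ("NB" == e) = false := by simp [Ne.symm hNB]
  have b3 : ("0" == e) = false := by simp [Ne.symm h0]
  have b4 : ("1" == e) = false := by simp [Ne.symm h1]
  have b5 : ("2" == e) = false := by simp [Ne.symm h2]
  have b6 : ("3" == e) = false := by simp [Ne.symm h3]
  have b7 : ("4" == e) = false := by simp [Ne.symm h4]
  have b8 : ("6" == e) = false := by simp [Ne.symm h6]
  simp [svVals, svTok, PySem.Dict.ofList, PySem.Dict.getD, PySem.Dict.get?, PySem.Dict.update, PySem.Dict.insert, PySem.Dict.items,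
        PySem.Dict.empty, List.find?, b1, b2, b3, b4, b5, b6, b7, b8,
        hWD, hNB, h0, h1, h2, h3, h4, h6]

-- sum of token values of a list
def svSum (l : List String) : Int := (l.map svTok).sum

theorem svSum_cons (i : String) (l : List String) : svSum (i :: l) = svTok i + svSum l := by
  simp [svSum]

theorem foldl_svSum (l : List String) (a : Int) :
    l.foldl (fun s e => s + svVals.getD e 0) a = a + svSum l := by
  induction l generalizing a with
  | nil => simp [svSum]
  | cons i rest ih =>
    rw [List.foldl_cons, svVals_getD, ih, svSum_cons]; ring

-- "remaining wickets" view: score and wickets collected before the (k+1)-st wicket would end play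
def svG : List String → Nat → Int × Int
  | [], _ => (0, 0)
  | _ :: _, 0 => (0, 0)
  | i :: rest, Nat.succ k =>
    if i == "W" then ((svG rest k).1, (svG rest k).2 + 1)
    else ((svG rest (k + 1)).1 + svTok i, (svG rest (k + 1)).2)

theorem svG_zero (l : List String) : svG l 0 = (0, 0) := by cases l <;> rfl

-- one step of A's loop, uniformly: a wicket bumps the counter, everything else adds svTok
theorem loop_cons (i : String) (rest : List String) (s c : Int) (h : (c == 10) = false) :
    scoreValidatorLoop (i :: rest) s c =
      if i == "W" then scoreValidatorLoop rest s (c + 1)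
      else scoreValidatorLoop rest (s + svTok i) c := by
  by_cases hWD : i = "WD"; · subst hWD; simp [scoreValidatorLoop, h, svTok]
  by_cases hNB : i = "NB"; · subst hNB; simp [scoreValidatorLoop, h, svTok]
  by_cases h0 : i = "0"; · subst h0; simp [scoreValidatorLoop, h, svTok, show PySem.Int.ofStr? "0" = some (0:Int) from by decide]
  by_cases h1 : i = "1"; · subst h1; simp [scoreValidatorLoop, h, svTok, show PySem.Int.ofStr? "1" = some (1:Int) from by decide]
  by_cases h2 : i = "2"; · subst h2; simp [scoreValidatorLoop, h, svTok, show PySem.Int.ofStr? "2" = some (2:Int) from by decide]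
  by_cases h3 : i = "3"; · subst h3; simp [scoreValidatorLoop, h, svTok, show PySem.Int.ofStr? "3" = some (3:Int) from by decide]
  by_cases h4 : i = "4"; · subst h4; simp [scoreValidatorLoop, h, svTok, show PySem.Int.ofStr? "4" = some (4:Int) from by decide]
  by_cases h6 : i = "6"; · subst h6; simp [scoreValidatorLoop, h, svTok, show PySem.Int.ofStr? "6" = some (6:Int) from by decide]
  by_cases hW : i = "W"; · subst hW; simp [scoreValidatorLoop, h, svTok]
  simp [scoreValidatorLoop, h, svTok, hWD, hNB, h0, h1, h2, h3, h4, h6, hW]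

-- A's loop computed through svG
theorem loop_eq_svG (events : List String) :
    ∀ (s : Int) (k : Nat), k ≤ 10 →
      scoreValidatorLoop events s (10 - (k : Int)) =
        (s + (svG events k).1, (10 - (k : Int)) + (svG events k).2) := by
  induction events with
  | nil => intro s k _; simp [scoreValidatorLoop, svG]
  | cons i rest ih =>
    intro s k hk
    match k with
    | 0 => norm_num [scoreValidatorLoop, svG_zero]
    | Nat.succ k =>
      have hne : ((10 - ((Nat.succ k : Nat) : Int)) == 10) = false := by
        simp; omega
      rw [loop_cons i rest s _ hne]
      by_cases hW : (i == "W") = true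
      · have h10k : 10 - ((Nat.succ k : Nat) : Int) + 1 = 10 - (k : Int) := by push_cast; ring
        rw [if_pos hW, h10k, ih s k (by omega)]
        simp [svG, hW]
        ring
      · rw [if_neg hW, ih (s + svTok i) (Nat.succ k) hk]
        simp [svG, hW]
        ring

-- wicket positions, recursively (as Int indices, like B's comprehension produces)
def svWIdx : List String → List Int
  | [] => []
  | i :: rest =>
    if i == "W" then 0 :: (svWIdx rest).map (· + 1) else (svWIdx rest).map (· + 1)

theorem svWIdx_nonneg : ∀ (l : List String) (x : Int), x ∈ svWIdx l → 0 ≤ x := by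
  intro l
  induction l with
  | nil => simp [svWIdx]
  | cons i rest ih =>
    intro x hx
    by_cases hW : (i == "W") = true
    · simp only [svWIdx, if_pos hW, List.mem_cons, List.mem_map] at hx
      rcases hx with h | ⟨a, ha, rfl⟩
      · omega
      · have := ih a ha; omega
    · simp only [svWIdx, if_neg hW, List.mem_map] at hx
      rcases hx with ⟨a, ha, rfl⟩
      have := ih a ha; omega

-- the enumerate/filter/map comprehension of B computes exactly those positions (shifted by the start)
theorem pos_eq (events : List String) :
    ∀ (s : Int),
      ((PySem.List.enumerate events s).filter (fun p => p.2 == "W")).map (fun p => p.1) =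
        (svWIdx events).map (fun n => s + n) := by
  induction events with
  | nil => intro s; simp [PySem.List.enumerate_nil, svWIdx]
  | cons i rest ih =>
    intro s
    rw [PySem.List.enumerate_cons]
    by_cases hW : (i == "W") = true
    · simp [List.filter_cons, hW, svWIdx, ih (s + 1), List.map_map, Function.comp]
      intro a _; ring
    · simp [List.filter_cons, hW, svWIdx, ih (s + 1), List.map_map, Function.comp]
      intro a _; ring

-- corollary of pos_eq at start 0 (the form B uses)
theorem pos_eq0 (events : List String) :
    ((PySem.List.enumerate events).filter (fun p => p.2 == "W")).map (fun p => p.1) =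
      svWIdx events := by
  rw [show PySem.List.enumerate events = PySem.List.enumerate events 0 from rfl, pos_eq events 0]
  simp

-- characterisation of svG by the wicket positions: the effective prefix and the wicket count
theorem svG_char (events : List String) :
    ∀ (k : Nat),
      svG events (k + 1) =
        if h : k < (svWIdx events).length
        then (svSum (events.take (((svWIdx events)[k]).toNat + 1)), (k : Int) + 1)
        else (svSum events, ((svWIdx events).length : Int)) := by
  induction events with
  | nil => intro k; simp [svG, svWIdx, svSum]
  | cons i rest ih =>
    intro k
    by_cases hW : (i == "W") = true
    · have hi : i = "W" := by simpa using hW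
      have hWIdx : svWIdx (i :: rest) = 0 :: (svWIdx rest).map (· + 1) := by
        simp [svWIdx, hW]
      match k with
      | 0 =>
        have hlt : 0 < (svWIdx (i :: rest)).length := by rw [hWIdx]; simp
        rw [dif_pos hlt]
        have h0 : (svWIdx (i :: rest))[0]'hlt = 0 := by simp [hWIdx]
        simp only [h0]
        simp [svG, hW, svG_zero, svSum_cons, svSum, hi, svTok]
      | Nat.succ k =>
        have hstep : svG (i :: rest) (Nat.succ k + 1) =
            ((svG rest (k + 1)).1, (svG rest (k + 1)).2 + 1) := by
          simp [svG, hW]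
        by_cases hlt : k < (svWIdx rest).length
        · have hlt' : Nat.succ k < (svWIdx (i :: rest)).length := by rw [hWIdx]; simp; omega
          have hidx : (svWIdx (i :: rest))[Nat.succ k]'hlt' = (svWIdx rest)[k]'hlt + 1 := by
            simp [hWIdx]
          have hnn : 0 ≤ (svWIdx rest)[k]'hlt :=
            svWIdx_nonneg rest _ (List.getElem_mem hlt)
          have htn : (((svWIdx rest)[k]'hlt) + 1).toNat = ((svWIdx rest)[k]'hlt).toNat + 1 := by
            omega
          rw [dif_pos hlt', hstep, ih k, dif_pos hlt, hidx, htn, List.take_succ_cons,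
              svSum_cons, hi]
          refine Prod.ext ?_ ?_
          · show svSum _ = svTok "W" + svSum _
            rw [show svTok "W" = (0 : Int) from by decide]; ring
          · show (k : Int) + 1 + 1 = _
            push_cast; ring
        · have hlt' : ¬ Nat.succ k < (svWIdx (i :: rest)).length := by
            rw [hWIdx]; simp; omega
          rw [dif_neg hlt', hstep, ih k, dif_neg hlt, hWIdx, svSum_cons, hi]
          refine Prod.ext ?_ ?_
          · show svSum _ = svTok "W" + svSum _
            rw [show svTok "W" = (0 : Int) from by decide]; ring
          · show ((svWIdx rest).length : Int) + 1 = _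
            push_cast; simp
    · have hWIdx : svWIdx (i :: rest) = (svWIdx rest).map (· + 1) := by
        simp [svWIdx, hW]
      have hstep : svG (i :: rest) (k + 1) =
          ((svG rest (k + 1)).1 + svTok i, (svG rest (k + 1)).2) := by
        simp [svG, hW]
      by_cases hlt : k < (svWIdx rest).length
      · have hlt' : k < (svWIdx (i :: rest)).length := by rw [hWIdx]; simp; omega
        have hidx : (svWIdx (i :: rest))[k]'hlt' = (svWIdx rest)[k]'hlt + 1 := by
          simp [hWIdx]
        have hnn : 0 ≤ (svWIdx rest)[k]'hlt :=
          svWIdx_nonneg rest _ (List.getElem_mem hlt)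
        have htn : (((svWIdx rest)[k]'hlt) + 1).toNat = ((svWIdx rest)[k]'hlt).toNat + 1 := by
          omega
        rw [dif_pos hlt', hstep, ih k, dif_pos hlt, hidx, htn, List.take_succ_cons, svSum_cons]
        refine Prod.ext ?_ ?_
        · show _ + svTok i = svTok i + _
          ring
        · rfl
      · have hlt' : ¬ k < (svWIdx (i :: rest)).length := by rw [hWIdx]; simp; omega
        rw [dif_neg hlt', hstep, ih k, dif_neg hlt, hWIdx, svSum_cons]
        refine Prod.ext ?_ ?_
        · show _ + svTok i = svTok i + _
          ring
        · show ((svWIdx rest).length : Int) = _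
          simp

-- ===== VERDICT (by name: the statement is the Claim_ definition above) =====
theorem scoreValidator_spec : Claim_equal_scoreValidator := by
  intro events _
  unfold Spec_scoreValidator scoreValidator scoreValidator_alt
  have hA := loop_eq_svG events 0 10 (le_refl 10)
  norm_num at hA
  rw [hA, pos_eq0 events]
  by_cases hge : (svWIdx events).length ≥ 10
  · have h9 : 9 < (svWIdx events).length := by omega
    have hchar := svG_char events 9
    rw [dif_pos h9] at hchar
    norm_num at hchar
    have hgetD : (svWIdx events).getD 9 0 = (svWIdx events)[9]'h9 := by
      simp [List.getD_eq_getElem?_getD, List.getElem?_eq_getElem h9]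
    simp only [if_pos (show ((svWIdx events).length ≥ 10) from hge), hgetD]
    rw [hchar, foldl_svSum]
    norm_num
  · have h9 : ¬ 9 < (svWIdx events).length := by omega
    have hchar := svG_char events 9
    rw [dif_neg h9] at hchar
    norm_num at hchar
    simp only [if_neg (show ¬ ((svWIdx events).length ≥ 10) from hge)]
    rw [hchar, foldl_svSum]
    norm_num
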